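-- pv_equiv track=rewrite | github.com/topherCantrell/sim-katamino | src/solver.py | ok_blanks
-- ===== SOURCE A (Python) =====
-- def _rec_blanks(blanks, cur_set, current):
--     test_cell = (current[0] + 1, current[1])
--     if test_cell in blanks:
--         cur_set.append(test_cell)
--         del blanks[blanks.index(test_cell)]
--         _rec_blanks(blanks, cur_set, test_cell)
--     test_cell = (current[0] - 1, current[1])
--     if test_cell in blanks:
--         cur_set.append(test_cell)
--         del blanks[blanks.index(test_cell)]
--         _rec_blanks(blanks, cur_set, test_cell)
--     test_cell = (current[0], current[1] + 1)
--     if test_cell in blanks: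
--         cur_set.append(test_cell)
--         del blanks[blanks.index(test_cell)]
--         _rec_blanks(blanks, cur_set, test_cell)
--     test_cell = (current[0], current[1] - 1)
--     if test_cell in blanks:
--         cur_set.append(test_cell)
--         del blanks[blanks.index(test_cell)]
--         _rec_blanks(blanks, cur_set, test_cell)
--
-- def ok_blanks(board):
--     blanks = []
--     for y in range(len(board)):
--         for x in range(len(board[0])):
--             if board[y][x] == '.':
--                 blanks.append((x, y))
--     while blanks:
--         cur_set = [blanks[0]]
--         del blanks[0]
--         _rec_blanks(blanks, cur_set, cur_set[0])
--         if len(cur_set) < 5: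
--             return False
--
--     return True
-- ===== SOURCE B (Python) =====
-- def ok_blanks(board):
--     blanks = [(x, y) for y in range(len(board)) for x in range(len(board[0])) if board[y][x] == '.']
--     remaining = set(blanks)
--     for seed in blanks:
--         if seed in remaining:
--             remaining.remove(seed)
--             stack = [seed]
--             size = 0
--             while stack:
--                 x, y = stack.pop()
--                 size += 1
--                 for n in ((x + 1, y), (x - 1, y), (x, y + 1), (x, y - 1)):
--                     if n in remaining:
--                         remaining.remove(n)
--                         stack.append(n)
--             if size < 5:
--                 return False
--     return True
-- ===== Notes on version B (the rewrite author's own statement) =====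
-- stated objective: alternative
-- what changed: A floods each component by deep recursion over a plain Python list with 'in'/'list.index'/'del' scans; B floods iteratively with an explicit stack over a set, scanning candidate seeds once in construction order.
import Mathlib
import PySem

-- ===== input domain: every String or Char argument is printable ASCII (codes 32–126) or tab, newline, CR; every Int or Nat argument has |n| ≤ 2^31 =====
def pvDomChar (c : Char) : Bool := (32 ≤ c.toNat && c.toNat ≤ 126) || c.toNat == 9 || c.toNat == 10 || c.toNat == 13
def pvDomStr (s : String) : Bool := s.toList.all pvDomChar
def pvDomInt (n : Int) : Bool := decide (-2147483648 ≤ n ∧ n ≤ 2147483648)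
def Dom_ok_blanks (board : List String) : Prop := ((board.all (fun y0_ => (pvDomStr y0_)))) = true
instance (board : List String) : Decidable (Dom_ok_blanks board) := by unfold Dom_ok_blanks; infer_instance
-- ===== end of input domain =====

-- B replaces A's recursive flood fill over a plain Python list (`in` / `list.index` / `del`
-- scans and deep recursion) by an iterative stack-based flood fill over a set, scanning
-- candidate seeds once in construction order; return values are proved identical on Pre_.

-- ===== PORT A =====

-- _rec_blanks: the recursion is made total with a fuel argument; fuel `blanks.length + 1` is
-- proved sufficient in the lemmas below (each nested call is preceded by a removal from blanks).
def pvRecA : Nat → List (Int × Int) → List (Int × Int) → (Int × Int) → List (Int × Int) × List (Int × Int)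
  | 0, blanks, cur, _ => (blanks, cur)
  | fuel + 1, blanks, cur, current =>
    -- four copies of: `test_cell = …; if test_cell in blanks: cur_set.append; del blanks[index]; recurse`
    let t1 : Int × Int := (current.1 + 1, current.2)
    let s1 := if t1 ∈ blanks then pvRecA fuel (blanks.erase t1) (cur ++ [t1]) t1 else (blanks, cur)
    let t2 : Int × Int := (current.1 - 1, current.2)
    let s2 := if t2 ∈ s1.1 then pvRecA fuel (s1.1.erase t2) (s1.2 ++ [t2]) t2 else s1
    let t3 : Int × Int := (current.1, current.2 + 1)
    let s3 := if t3 ∈ s2.1 then pvRecA fuel (s2.1.erase t3) (s2.2 ++ [t3]) t3 else s2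
    let t4 : Int × Int := (current.1, current.2 - 1)
    let s4 := if t4 ∈ s3.1 then pvRecA fuel (s3.1.erase t4) (s3.2 ++ [t4]) t4 else s3
    s4

-- `while blanks:` — fuel `blanks.length` is sufficient since every iteration removes the seed.
def pvWhileA : Nat → List (Int × Int) → Bool
  | _, [] => true
  | 0, _ :: _ => true  -- fuel exhausted: unreachable for the fuel ok_blanks passes
  | fuel + 1, b0 :: rest =>
    let r := pvRecA (rest.length + 1) rest [b0] b0
    if r.2.length < 5 then false else pvWhileA fuel r.1

def ok_blanks (board : List String) : Bool :=
  let blanks := (List.range board.length).foldl (fun acc (y : Nat) =>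
    (List.range (PySem.Str.len (PySem.List.pyGetD board 0 "")).toNat).foldl (fun acc2 (x : Nat) =>
      if PySem.Str.pyGet? (PySem.List.pyGetD board (y : Int) "") (x : Int) = some '.'
      then acc2 ++ [((x : Int), (y : Int))] else acc2) acc) []
  pvWhileA blanks.length blanks

-- ===== PORT B =====

-- the tuple `((x+1,y),(x-1,y),(x,y+1),(x,y-1))` iterated by B's inner for-loop
def pvNbrs (c : Int × Int) : List (Int × Int) :=
  [(c.1 + 1, c.2), (c.1 - 1, c.2), (c.1, c.2 + 1), (c.1, c.2 - 1)]

-- body of the `for n in (…): if n in remaining: remaining.remove(n); stack.append(n)` loop;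
-- the stack is modelled most-recent-first (Python appends and pops at the same end).
def pvStep (st : List (Int × Int) × List (Int × Int)) (n : Int × Int) :
    List (Int × Int) × List (Int × Int) :=
  if n ∈ st.1 then ((PySem.Set.remove? st.1 n).getD st.1, n :: st.2) else st

theorem pvStep_mem {rem st : List (Int × Int)} {n : Int × Int} (h : n ∈ rem) :
    pvStep (rem, st) n = (rem.filter (fun y => !(y == n)), n :: st) := by
  simp [pvStep, h, PySem.Set.remove?, PySem.Set.discard]

theorem pvStep_not_mem {rem st : List (Int × Int)} {n : Int × Int} (h : n ∉ rem) :
    pvStep (rem, st) n = (rem, st) := by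
  simp [pvStep, h]

theorem pvStep_foldl_len (l : List (Int × Int)) :
    ∀ rem st : List (Int × Int),
      (l.foldl pvStep (rem, st)).1.length + (l.foldl pvStep (rem, st)).2.length ≤
        rem.length + st.length := by
  induction l with
  | nil => intro rem st; simp
  | cons n l ih =>
    intro rem st
    by_cases h : n ∈ rem
    · rw [List.foldl_cons, pvStep_mem h]
      have h1 := ih (rem.filter (fun y => !(y == n))) (n :: st)
      have h2 : (rem.filter (fun y => !(y == n))).length < rem.length := by
        have h3 := List.length_eq_length_filter_add (l := rem) (fun y => !(y == n))
        have h4 : n ∈ rem.filter (fun x => !(!(x == n))) := by simp [List.mem_filter, h]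
        have h5 := List.length_pos_of_mem h4
        omega
      simp only [List.length_cons] at *
      omega
    · rw [List.foldl_cons, pvStep_not_mem h]
      exact ih rem st

-- `while stack:` of B
def pvFlood (remaining stack : List (Int × Int)) (size : Int) : List (Int × Int) × Int :=
  match stack with
  | [] => (remaining, size)
  | c :: rest =>
    let s := (pvNbrs c).foldl pvStep (remaining, rest)
    pvFlood s.1 s.2 (size + 1)
termination_by remaining.length + stack.length
decreasing_by
  have h := pvStep_foldl_len (pvNbrs c) remaining rest
  simp only [List.length_cons]
  omega

-- `for seed in blanks:` of B
def pvOuterB : List (Int × Int) → List (Int × Int) → Bool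
  | [], _ => true
  | seed :: seeds, remaining =>
    if seed ∈ remaining then
      let rem1 := (PySem.Set.remove? remaining seed).getD remaining
      let r := pvFlood rem1 [seed] 0
      if r.2 < 5 then false else pvOuterB seeds r.1
    else pvOuterB seeds remaining

def ok_blanks_alt (board : List String) : Bool :=
  let blanks := (List.range board.length).flatMap (fun (y : Nat) =>
    (List.range (PySem.Str.len (PySem.List.pyGetD board 0 "")).toNat).filterMap (fun (x : Nat) =>
      if PySem.Str.pyGet? (PySem.List.pyGetD board (y : Int) "") (x : Int) = some '.'
      then some ((x : Int), (y : Int)) else none))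
  pvOuterB blanks (PySem.Set.ofList blanks)

-- ===== PRECONDITION & SPEC =====

-- Pre_ excludes exactly the ragged boards on which Python A raises IndexError
-- (a row shorter than row 0); on them B raises the same IndexError.
def Pre_ok_blanks (board : List String) : Prop :=
  ∀ r ∈ board, PySem.Str.len (PySem.List.pyGetD board 0 "") ≤ PySem.Str.len r
instance (board : List String) : Decidable (Pre_ok_blanks board) := by
  unfold Pre_ok_blanks; infer_instance

def pvWitness_ok_blanks : List String := ["..#..", ".....", "#...#"]

def Spec_ok_blanks (board : List String) (out : Bool) : Prop := out = ok_blanks_alt board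
instance (board : List String) (out : Bool) : Decidable (Spec_ok_blanks board out) := by
  unfold Spec_ok_blanks; infer_instance

-- ===== CLAIM (what is proved, stated in full; the proofs are below) =====
def Claim_equal_ok_blanks : Prop := ∀ (board : List String), Dom_ok_blanks board → Pre_ok_blanks board → Spec_ok_blanks board (ok_blanks board)

-- ===== LEMMAS AND PROOFS =====

-- reachability through blank cells: the connected component both flood fills compute
inductive pvReach (avail : List (Int × Int)) (s : Int × Int) : (Int × Int) → Prop
  | refl : pvReach avail s s
  | tail {b c} : pvReach avail s b → c ∈ pvNbrs b → c ∈ avail → pvReach avail s c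

theorem pvNbrs_symm {a b : Int × Int} (h : a ∈ pvNbrs b) : b ∈ pvNbrs a := by
  rcases a with ⟨ax, ay⟩; rcases b with ⟨bx, by'⟩
  simp only [pvNbrs, List.mem_cons, List.not_mem_nil, or_false, Prod.mk.injEq] at h ⊢
  omega

theorem pvReach_mono {a1 a2 : List (Int × Int)} {s c} (hsub : ∀ x ∈ a1, x ∈ a2)
    (h : pvReach a1 s c) : pvReach a2 s c := by
  induction h with
  | refl => exact pvReach.refl
  | tail _ hn hm ih => exact pvReach.tail ih hn (hsub _ hm)

theorem pvReach_trans {avail : List (Int × Int)} {s t c}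
    (h1 : pvReach avail s t) (h2 : pvReach avail t c) : pvReach avail s c := by
  induction h2 with
  | refl => exact h1
  | tail _ hn hm ih => exact pvReach.tail ih hn hm

-- a generated and closed subset of the blanks IS the connected component of the seed
theorem pvComponent_unique (blanks0 : List (Int × Int)) (s : Int × Int)
    (added : List (Int × Int))
    (hsub : ∀ a ∈ added, a ∈ blanks0) (hs : s ∉ blanks0)
    (hgen : ∀ a ∈ added, pvReach blanks0 s a)
    (hcl : ∀ bb ∈ blanks0, bb ∉ added → ∀ c, (c = s ∨ c ∈ added) → c ∉ pvNbrs bb) :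
    ∀ x, x ∈ added ↔ (x ∈ blanks0 ∧ pvReach blanks0 s x) := by
  intro x
  constructor
  · exact fun hx => ⟨hsub x hx, hgen x hx⟩
  · rintro ⟨hxb, hr⟩
    have key : ∀ y, pvReach blanks0 s y → y = s ∨ y ∈ added := by
      intro y hy
      induction hy with
      | refl => exact Or.inl rfl
      | @tail b c _ hn hm ih =>
        by_contra hc
        push Not at hc
        exact hcl c hm hc.2 b ih (pvNbrs_symm hn)
    rcases key x hr with h | h
    · exact absurd (h ▸ hxb) hs
    · exact h

theorem pvFilter_anti {b u v : List (Int × Int)} (hsub : ∀ x ∈ u, x ∈ v) :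
    ∀ x ∈ b.filter (fun x => !(v.contains x)), x ∈ b.filter (fun x => !(u.contains x)) := by
  intro x hx
  simp only [List.mem_filter] at hx ⊢
  refine ⟨hx.1, ?_⟩
  have h2 := hx.2
  simp only [List.contains_eq_mem, Bool.not_eq_eq_eq_not, Bool.not_true, decide_eq_false_iff_not] at h2 ⊢
  exact fun hc => h2 (hsub _ hc)

theorem pvFilter_append (b u v : List (Int × Int)) :
    (b.filter (fun x => !(u.contains x))).filter (fun x => !(v.contains x)) =
      b.filter (fun x => !((u ++ v).contains x)) := by
  rw [List.filter_filter]
  apply List.filter_congr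
  intro x _
  by_cases hu : x ∈ u <;> by_cases hv : x ∈ v <;> simp [hu, hv]

theorem pvFilter_length {rem P : List (Int × Int)} (hrem : rem.Nodup) (hP : P.Nodup)
    (hsub : ∀ p ∈ P, p ∈ rem) :
    (rem.filter (fun x => !(P.contains x))).length + P.length = rem.length := by
  have hperm : (rem.filter (fun x => P.contains x)).Perm P := by
    refine (List.perm_ext_iff_of_nodup (hrem.filter _) hP).2 ?_
    intro a
    simp only [List.mem_filter, List.contains_eq_mem, decide_eq_true_eq]
    exact ⟨fun h => h.2, fun h => ⟨hsub a h, h⟩⟩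
  have h1 := List.length_eq_length_filter_add (l := rem) (fun x => P.contains x)
  have h2 := hperm.length_eq
  omega

-- one `if test_cell in blanks: …` block of _rec_blanks, relative to the original blanks
theorem pvRecA_step (fuel : Nat)
    (IH : ∀ (blanks cur : List (Int × Int)) current, blanks.Nodup → blanks.length < fuel →
      ∃ added : List (Int × Int),
        pvRecA fuel blanks cur current =
          (blanks.filter (fun x => !(added.contains x)), cur ++ added) ∧
        added.Nodup ∧ (∀ a ∈ added, a ∈ blanks) ∧
        (∀ a ∈ added, pvReach blanks current a) ∧
        (∀ bb ∈ blanks, bb ∉ added → ∀ c, (c = current ∨ c ∈ added) → c ∉ pvNbrs bb))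
    (blanks0 : List (Int × Int)) (hn0 : blanks0.Nodup)
    (current t : Int × Int) (ht : t ∈ pvNbrs current)
    (added cur : List (Int × Int))
    (h1 : added.Nodup) (h2 : ∀ a ∈ added, a ∈ blanks0)
    (h4 : ∀ a ∈ added, pvReach blanks0 current a)
    (hfuel : (blanks0.filter (fun x => !(added.contains x))).length ≤ fuel) :
    ∃ new : List (Int × Int),
      (if t ∈ blanks0.filter (fun x => !(added.contains x)) then
          pvRecA fuel ((blanks0.filter (fun x => !(added.contains x))).erase t) (cur ++ [t]) t
        else (blanks0.filter (fun x => !(added.contains x)), cur)) =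
        (blanks0.filter (fun x => !((added ++ new).contains x)), cur ++ new) ∧
      (added ++ new).Nodup ∧ (∀ a ∈ added ++ new, a ∈ blanks0) ∧
      (∀ a ∈ added ++ new, pvReach blanks0 current a) ∧
      t ∉ blanks0.filter (fun x => !((added ++ new).contains x)) ∧
      (∀ bb ∈ blanks0, bb ∉ added ++ new → ∀ c ∈ new, c ∉ pvNbrs bb) := by
  set b := blanks0.filter (fun x => !(added.contains x)) with hb
  by_cases htb : t ∈ b
  · rw [if_pos htb]
    have htblanks : t ∈ blanks0 := (List.mem_filter.1 htb).1
    have htadded : t ∉ added := by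
      have := (List.mem_filter.1 htb).2
      simpa using this
    have herase : b.erase t = blanks0.filter (fun x => !((added ++ [t]).contains x)) := by
      rw [(hn0.filter _).erase_eq_filter t, List.filter_filter]
      apply List.filter_congr
      intro x _
      by_cases hx : x = t <;> simp [hx]
    have hlen : (b.erase t).length < fuel := by
      have h5 := b.length_erase_of_mem htb
      have h6 := List.length_pos_of_mem htb
      omega
    obtain ⟨as, hrec, hasnd, hasmem, hasreach, hascl⟩ :=
      IH (b.erase t) (cur ++ [t]) t ((hn0.filter _).erase t) hlen
    have hsub' : ∀ a ∈ as, a ∈ b.erase t := hasmem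
    have hsub'' : ∀ a ∈ as, a ∈ blanks0 ∧ a ∉ added ∧ a ≠ t := by
      intro a ha
      have h5 := hsub' a ha
      rw [herase] at h5
      have h6 := List.mem_filter.1 h5
      have h7 := h6.2
      simp only [List.contains_append, List.contains_cons] at h7
      constructor
      · exact h6.1
      constructor
      · intro hc
        simp [hc] at h7
      · intro hc
        simp [hc] at h7
    refine ⟨t :: as, ?_, ?_, ?_, ?_, ?_, ?_⟩
    · rw [hrec, herase, pvFilter_append]
      have hassoc : (added ++ [t]) ++ as = added ++ t :: as := by simp
      rw [hassoc]
      simp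
    · refine List.Nodup.append h1
        (List.nodup_cons.2 ⟨fun hc => (hsub'' t hc).2.2 rfl, hasnd⟩) ?_
      intro x hx hy
      rcases List.mem_cons.1 hy with h5 | h5
      · exact htadded (h5 ▸ hx)
      · exact (hsub'' x h5).2.1 hx
    · intro a ha
      rcases List.mem_append.1 ha with h5 | h5
      · exact h2 a h5
      · rcases List.mem_cons.1 h5 with h6 | h6
        · exact h6 ▸ htblanks
        · exact (hsub'' a h6).1
    · intro a ha
      have hreacht : pvReach blanks0 current t := pvReach.tail pvReach.refl ht htblanks
      rcases List.mem_append.1 ha with h5 | h5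
      · exact h4 a h5
      · rcases List.mem_cons.1 h5 with h6 | h6
        · exact h6 ▸ hreacht
        · refine pvReach_trans hreacht ?_
          refine pvReach_mono ?_ (hasreach a h6)
          intro x hx
          exact (List.mem_filter.1 (List.mem_of_mem_erase hx)).1
    · simp [List.mem_filter]
    · intro bb hbb hbnr c hc
      have hbb' : bb ∈ b.erase t := by
        have hbadded : bb ∉ added := fun hc2 => hbnr (List.mem_append.2 (Or.inl hc2))
        have hbt : bb ≠ t := fun hc2 =>
          hbnr (List.mem_append.2 (Or.inr (hc2 ▸ List.mem_cons_self ..)))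
        rw [herase]
        simp [List.mem_filter, hbb, hbadded, hbt]
      have hbnas : bb ∉ as := fun hc2 =>
        hbnr (List.mem_append.2 (Or.inr (List.mem_cons_of_mem _ hc2)))
      rcases List.mem_cons.1 hc with h5 | h5
      · exact hascl bb hbb' hbnas c (Or.inl h5)
      · exact hascl bb hbb' hbnas c (Or.inr h5)
  · rw [if_neg htb]
    refine ⟨[], by simp only [List.append_nil]; rw [hb], by simpa using h1, by simpa using h2,
      by simpa using h4, by simp only [List.append_nil]; exact htb, by simp⟩


theorem pvRecA_spec : ∀ fuel (blanks cur : List (Int × Int)) current,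
    blanks.Nodup → blanks.length < fuel →
    ∃ added : List (Int × Int),
      pvRecA fuel blanks cur current =
        (blanks.filter (fun x => !(added.contains x)), cur ++ added) ∧
      added.Nodup ∧ (∀ a ∈ added, a ∈ blanks) ∧
      (∀ a ∈ added, pvReach blanks current a) ∧
      (∀ bb ∈ blanks, bb ∉ added → ∀ c, (c = current ∨ c ∈ added) → c ∉ pvNbrs bb) := by
  intro fuel
  induction fuel with
  | zero => intro blanks cur current _ hlen; omega
  | succ f ih =>
    intro blanks cur current hn hlen
    have hfl : blanks.length ≤ f := Nat.lt_succ_iff.mp hlen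
    have hfix : blanks.filter (fun x => !(([] : List (Int × Int)).contains x)) = blanks := by
      simp
    obtain ⟨n1, e1, nd1, mem1, re1, ab1, cl1⟩ :=
      pvRecA_step f ih blanks hn current (current.1 + 1, current.2) (by simp [pvNbrs])
        [] cur List.nodup_nil (by simp) (by simp)
        (by rw [hfix]; exact hfl)
    rw [hfix] at e1
    simp only [List.nil_append] at e1 nd1 mem1 re1 ab1 cl1
    obtain ⟨n2, e2, nd2, mem2, re2, ab2, cl2⟩ :=
      pvRecA_step f ih blanks hn current (current.1 - 1, current.2) (by simp [pvNbrs])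
        n1 (cur ++ n1) nd1 mem1 re1 (le_trans (List.length_filter_le _ _) hfl)
    obtain ⟨n3, e3, nd3, mem3, re3, ab3, cl3⟩ :=
      pvRecA_step f ih blanks hn current (current.1, current.2 + 1) (by simp [pvNbrs])
        (n1 ++ n2) ((cur ++ n1) ++ n2) nd2 mem2 re2
        (le_trans (List.length_filter_le _ _) hfl)
    obtain ⟨n4, e4, nd4, mem4, re4, ab4, cl4⟩ :=
      pvRecA_step f ih blanks hn current (current.1, current.2 - 1) (by simp [pvNbrs])
        ((n1 ++ n2) ++ n3) (((cur ++ n1) ++ n2) ++ n3) nd3 mem3 re3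
        (le_trans (List.length_filter_le _ _) hfl)
    refine ⟨((n1 ++ n2) ++ n3) ++ n4, ?_, nd4, mem4, re4, ?_⟩
    · show pvRecA (f + 1) blanks cur current = _
      simp only [pvRecA]
      rw [e1]
      dsimp only
      rw [e2]
      dsimp only
      rw [e3]
      dsimp only
      rw [e4]
      simp [List.append_assoc]
    · intro bb hbb hbnr c hc
      have s1sub : ∀ x ∈ n1, x ∈ ((n1 ++ n2) ++ n3) ++ n4 := by
        intro x hx; simp [List.mem_append, hx]
      have s2sub : ∀ x ∈ n1 ++ n2, x ∈ ((n1 ++ n2) ++ n3) ++ n4 := by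
        intro x hx; simp only [List.mem_append] at hx ⊢; tauto
      have s3sub : ∀ x ∈ (n1 ++ n2) ++ n3, x ∈ ((n1 ++ n2) ++ n3) ++ n4 := by
        intro x hx; simp only [List.mem_append] at hx ⊢; tauto
      rcases hc with rfl | hcmem
      · intro hcn
        have hbmem : bb ∈ pvNbrs c := pvNbrs_symm hcn
        have hbfil4 : bb ∈ blanks.filter
            (fun x => !((((n1 ++ n2) ++ n3) ++ n4).contains x)) := by
          have h' := hbnr
          simp only [List.mem_append, not_or] at h'
          simp [List.mem_filter, hbb]
          tauto
        simp only [pvNbrs, List.mem_cons, List.not_mem_nil, or_false] at hbmem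
        rcases hbmem with h | h | h | h
        · exact ab1 (h ▸ pvFilter_anti s1sub bb hbfil4)
        · exact ab2 (h ▸ pvFilter_anti s2sub bb hbfil4)
        · exact ab3 (h ▸ pvFilter_anti s3sub bb hbfil4)
        · exact ab4 (h ▸ hbfil4)
      · have hb1 : bb ∉ n1 := fun hx => hbnr (s1sub bb hx)
        have hb2 : bb ∉ n1 ++ n2 := fun hx => hbnr (s2sub bb hx)
        have hb3 : bb ∉ (n1 ++ n2) ++ n3 := fun hx => hbnr (s3sub bb hx)
        rcases List.mem_append.1 hcmem with h123 | h4m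
        · rcases List.mem_append.1 h123 with h12 | h3m
          · rcases List.mem_append.1 h12 with h1m | h2m
            · exact cl1 bb hbb hb1 c h1m
            · exact cl2 bb hbb hb2 c h2m
          · exact cl3 bb hbb hb3 c h3m
        · exact cl4 bb hbb hbnr c h4m

theorem pvFold_spec : ∀ (l : List (Int × Int)) (rem st : List (Int × Int)), rem.Nodup →
    ∃ P : List (Int × Int),
      l.foldl pvStep (rem, st) = (rem.filter (fun x => !(P.contains x)), P.reverse ++ st) ∧
      P.Nodup ∧ (∀ p ∈ P, p ∈ rem) ∧ (∀ p ∈ P, p ∈ l) ∧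
      (∀ n ∈ l, n ∉ rem.filter (fun x => !(P.contains x))) := by
  intro l
  induction l with
  | nil =>
    intro rem st _
    exact ⟨[], by simp, by simp, by simp, by simp, by simp⟩
  | cons n l ih =>
    intro rem st hn
    by_cases h : n ∈ rem
    · have hstep : (n :: l).foldl pvStep (rem, st) =
          l.foldl pvStep (rem.filter (fun y => !(y == n)), n :: st) := by
        rw [List.foldl_cons, pvStep_mem h]
      obtain ⟨P, hP, hnd, hmem, hml, habs⟩ :=
        ih (rem.filter (fun y => !(y == n))) (n :: st) (hn.filter _)
      have hfilt : (rem.filter (fun y => !(y == n))).filter (fun x => !(P.contains x)) =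
          rem.filter (fun x => !((n :: P).contains x)) := by
        rw [List.filter_filter]
        apply List.filter_congr
        intro x _
        by_cases hx : x = n <;> simp [hx]
      have hnP : n ∉ P := fun hc => by simpa using (hmem n hc)
      refine ⟨n :: P, ?_, ?_, ?_, ?_, ?_⟩
      · rw [hstep, hP, hfilt]
        simp
      · exact List.nodup_cons.2 ⟨hnP, hnd⟩
      · intro p hp
        rcases List.mem_cons.1 hp with h1 | h1
        · exact h1 ▸ h
        · exact (List.mem_filter.1 (hmem p h1)).1
      · intro p hp
        rcases List.mem_cons.1 hp with h1 | h1
        · simp [h1]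
        · exact List.mem_cons_of_mem _ (hml p h1)
      · intro m hm
        rcases List.mem_cons.1 hm with h1 | h1
        · subst h1; simp [List.mem_filter]
        · have := habs m h1
          rw [hfilt] at this
          exact this
    · have hstep : (n :: l).foldl pvStep (rem, st) = l.foldl pvStep (rem, st) := by
        rw [List.foldl_cons, pvStep_not_mem h]
      obtain ⟨P, hP, hnd, hmem, hml, habs⟩ := ih rem st hn
      refine ⟨P, by rw [hstep, hP], hnd, hmem,
        fun p hp => List.mem_cons_of_mem _ (hml p hp), ?_⟩
      intro m hm
      rcases List.mem_cons.1 hm with h1 | h1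
      · subst h1
        exact fun hc => h (List.mem_filter.1 hc).1
      · exact habs m h1

theorem pvFlood_spec : ∀ (N : Nat) (rem stack : List (Int × Int)) (size : Int),
    rem.length + stack.length ≤ N → rem.Nodup →
    ∃ removed : List (Int × Int),
      pvFlood rem stack size =
        (rem.filter (fun x => !(removed.contains x)),
         size + stack.length + removed.length) ∧
      removed.Nodup ∧ (∀ r ∈ removed, r ∈ rem) ∧
      (∀ r ∈ removed, ∃ t ∈ stack, pvReach rem t r) ∧
      (∀ bb ∈ rem, bb ∉ removed → ∀ c, (c ∈ stack ∨ c ∈ removed) → c ∉ pvNbrs bb) := by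
  intro N
  induction N with
  | zero =>
    intro rem stack size hN _
    have hs : stack = [] := List.eq_nil_of_length_eq_zero (by omega)
    subst hs
    exact ⟨[], by rw [pvFlood]; simp, by simp, by simp, by simp, by simp⟩
  | succ N ih =>
    intro rem stack size hN hnd
    match stack with
    | [] =>
      exact ⟨[], by rw [pvFlood]; simp, by simp, by simp, by simp, by simp⟩
    | c :: rest =>
      rw [pvFlood]
      obtain ⟨P, hP, hPnd, hPrem, hPl, habs⟩ := pvFold_spec (pvNbrs c) rem rest hnd
      simp only [hP]
      have hlen := pvFilter_length hnd hPnd hPrem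
      have hbound : (rem.filter (fun x => !(P.contains x))).length +
          (P.reverse ++ rest).length ≤ N := by
        simp only [List.length_append, List.length_reverse]
        simp only [List.length_cons] at hN
        omega
      obtain ⟨removed1, hF, hnd1, hmem1, hreach1, hcl1⟩ :=
        ih (rem.filter (fun x => !(P.contains x))) (P.reverse ++ rest) (size + 1)
          hbound (hnd.filter _)
      have hsub1 : ∀ r ∈ removed1, r ∈ rem := by
        intro r hr
        exact (List.mem_filter.1 (hmem1 r hr)).1
      have hnotP : ∀ r ∈ removed1, r ∉ P := by
        intro r hr hc
        have := hmem1 r hr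
        simp [List.mem_filter, hc] at this
      refine ⟨P ++ removed1, ?_, ?_, ?_, ?_, ?_⟩
      · rw [hF, pvFilter_append]
        have hcount : size + 1 + ((P.reverse ++ rest).length : Int) + (removed1.length : Int) =
            size + ((c :: rest).length : Int) + ((P ++ removed1).length : Int) := by
          simp only [List.length_append, List.length_reverse, List.length_cons]
          push_cast
          ring
        rw [hcount]
      · refine List.Nodup.append hPnd hnd1 ?_
        intro x hx hc
        exact hnotP x hc hx
      · intro r hr
        rcases List.mem_append.1 hr with h1 | h1
        · exact hPrem r h1
        · exact hsub1 r h1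
      · intro r hr
        rcases List.mem_append.1 hr with h1 | h1
        · exact ⟨c, List.mem_cons_self .., pvReach.tail pvReach.refl (hPl r h1) (hPrem r h1)⟩
        · obtain ⟨t, ht, htr⟩ := hreach1 r h1
          have hmono : pvReach rem t r :=
            pvReach_mono (fun x hx => (List.mem_filter.1 hx).1) htr
          rcases List.mem_append.1 ht with h2 | h2
          · have h3 : t ∈ P := List.mem_reverse.1 h2
            exact ⟨c, List.mem_cons_self ..,
              pvReach_trans (pvReach.tail pvReach.refl (hPl t h3) (hPrem t h3)) hmono⟩
          · exact ⟨t, List.mem_cons_of_mem _ h2, hmono⟩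
      · intro bb hbb hbnr c' hc'
        have hbbP : bb ∉ P := fun hc => hbnr (List.mem_append.2 (Or.inl hc))
        have hbb1 : bb ∈ rem.filter (fun x => !(P.contains x)) := by
          simp [List.mem_filter, hbb, hbbP]
        have hbnr1 : bb ∉ removed1 := fun hc => hbnr (List.mem_append.2 (Or.inr hc))
        rcases hc' with h1 | h1
        · rcases List.mem_cons.1 h1 with h2 | h2
          · subst h2
            intro hcn
            exact habs bb (pvNbrs_symm hcn) hbb1
          · exact hcl1 bb hbb1 hbnr1 c' (Or.inl (List.mem_append.2 (Or.inr h2)))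
        · rcases List.mem_append.1 h1 with h2 | h2
          · exact hcl1 bb hbb1 hbnr1 c'
              (Or.inl (List.mem_append.2 (Or.inl (List.mem_reverse.2 h2))))
          · exact hcl1 bb hbb1 hbnr1 c' (Or.inr h2)

theorem pvOuter_equiv : ∀ (seeds : List (Int × Int)) (fuel : Nat) (rem : List (Int × Int)),
    rem.Nodup → rem.Sublist seeds → seeds.Nodup → rem.length ≤ fuel →
    pvWhileA fuel rem = pvOuterB seeds rem := by
  intro seeds
  induction seeds with
  | nil =>
    intro fuel rem _ hsub _ _
    have h0 : rem = [] := List.sublist_nil.mp hsub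
    subst h0
    cases fuel <;> rfl
  | cons s rest ih =>
    intro fuel rem hnd hsub hsnd hfuel
    have hrest_nd := (List.nodup_cons.1 hsnd).2
    have hsnotin := (List.nodup_cons.1 hsnd).1
    cases rem with
    | nil =>
      have h1 : pvOuterB (s :: rest) [] = pvOuterB rest [] := by simp [pvOuterB]
      rw [h1, ← ih fuel [] (by simp) (List.nil_sublist _) hrest_nd (by simp)]
    | cons r0 rem' =>
      have hr0nin : r0 ∉ rem' := (List.nodup_cons.1 hnd).1
      have hrem'nd : rem'.Nodup := (List.nodup_cons.1 hnd).2
      by_cases hs : s = r0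
      · subst hs
        have hsub' : rem'.Sublist rest := by
          cases hsub with
          | cons _ h => exact absurd (h.subset (List.mem_cons_self ..)) hsnotin
          | cons₂ _ h => exact h
        cases fuel with
        | zero => simp at hfuel
        | succ f =>
          have hfuel' : rem'.length ≤ f := by
            simp only [List.length_cons] at hfuel; omega
          obtain ⟨added, hA, hAnd, hAmem, hAreach, hAcl⟩ :=
            pvRecA_spec (rem'.length + 1) rem' [s] s hrem'nd (by omega)
          obtain ⟨removed, hB, hBnd, hBmem, hBreach, hBcl⟩ :=
            pvFlood_spec (rem'.length + 1) rem' [s] 0 (by simp) hrem'nd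
          have hAiff := pvComponent_unique rem' s added hAmem hr0nin hAreach hAcl
          have hBiff := pvComponent_unique rem' s removed hBmem hr0nin
            (fun r hr => by
              obtain ⟨t, ht, htr⟩ := hBreach r hr
              have h2 : t = s := by simpa using ht
              exact h2 ▸ htr)
            (fun bb hbb hbn c hc => by
              refine hBcl bb hbb hbn c ?_
              rcases hc with h2 | h2
              · exact Or.inl (by simp [h2])
              · exact Or.inr h2)
          have hiff : ∀ x, x ∈ added ↔ x ∈ removed :=
            fun x => (hAiff x).trans (hBiff x).symm
          have hlen_eq : added.length = removed.length :=
            ((List.perm_ext_iff_of_nodup hAnd hBnd).2 hiff).length_eq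
          have hfilter_eq : rem'.filter (fun x => !(added.contains x)) =
              rem'.filter (fun x => !(removed.contains x)) := by
            apply List.filter_congr
            intro x _
            by_cases h2 : x ∈ added
            · simp [h2, (hiff x).1 h2]
            · have h3 : x ∉ removed := fun hc => h2 ((hiff x).2 hc)
              simp [h2, h3]
          have hrem1 : (PySem.Set.remove? (s :: rem') s).getD (s :: rem') = rem' := by
            have h2 : List.filter (fun y => !(y == s)) (s :: rem') = rem' := by
              rw [List.filter_cons]
              simp only [beq_self_eq_true, Bool.not_true, if_neg (by simp : ¬ (false = true))]
              refine List.filter_eq_self.2 (fun a ha => ?_)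
              simp
              exact fun hc => hr0nin (hc ▸ ha)
            simp [PySem.Set.remove?, PySem.Set.discard, h2]
          have hwA : pvWhileA (f + 1) (s :: rem') =
              (if ([s] ++ added).length < 5 then false
               else pvWhileA f (rem'.filter (fun x => !(added.contains x)))) := by
            simp only [pvWhileA]
            rw [hA]
          have hwB : pvOuterB (s :: rest) (s :: rem') =
              (if ((0 : Int) + ([s] : List (Int × Int)).length + removed.length < 5) then false
               else pvOuterB rest (rem'.filter (fun x => !(removed.contains x)))) := by
            simp only [pvOuterB, if_pos (List.mem_cons_self ..)]
            rw [hrem1, hB]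
          rw [hwA, hwB]
          by_cases hc : ([s] ++ added).length < 5
          · rw [if_pos hc, if_pos (by
              simp only [List.length_append, List.length_singleton] at hc
              simp only [List.length_singleton]
              push_cast
              omega)]
          · rw [if_neg hc, if_neg (by
              simp only [List.length_append, List.length_singleton] at hc
              simp only [List.length_singleton]
              push_cast
              omega), hfilter_eq]
            exact ih f _ (hrem'nd.filter _) (List.filter_sublist.trans hsub')
              hrest_nd (le_trans (List.length_filter_le _ _) hfuel')
      · have hsub' : (r0 :: rem').Sublist rest := by
          cases hsub with
          | cons _ h => exact h
          | cons₂ _ h => exact absurd rfl hs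
        have hnotmem : s ∉ (r0 :: rem') := fun hm => hsnotin (hsub'.subset hm)
        have h1 : pvOuterB (s :: rest) (r0 :: rem') = pvOuterB rest (r0 :: rem') := by
          simp [pvOuterB, hnotmem]
        rw [h1]
        exact ih fuel (r0 :: rem') hnd hsub' hrest_nd hfuel

-- A's nested append loops build the same blank list as B's comprehension
theorem pvBuild_eq (P : Nat → Nat → Prop) [inst : ∀ x y, Decidable (P x y)]
    (g : Nat → Nat → Int × Int) (w : Nat) :
    ∀ (l : List Nat) (acc : List (Int × Int)),
      l.foldl (fun acc y =>
          (List.range w).foldl (fun acc2 x => if P x y then acc2 ++ [g x y] else acc2) acc) acc =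
        acc ++ l.flatMap (fun y =>
          (List.range w).filterMap (fun x => if P x y then some (g x y) else none)) := by
  have inner : ∀ (m : List Nat) (y : Nat) (acc2 : List (Int × Int)),
      m.foldl (fun acc2 x => if P x y then acc2 ++ [g x y] else acc2) acc2 =
        acc2 ++ m.filterMap (fun x => if P x y then some (g x y) else none) := by
    intro m y
    induction m with
    | nil => intro acc2; simp
    | cons a m ihm =>
      intro acc2
      rw [List.foldl_cons, List.filterMap_cons]
      by_cases h : P a y
      · rw [if_pos h, if_pos h, ihm]
        simp
      · rw [if_neg h, if_neg h, ihm]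
  intro l
  induction l with
  | nil => intro acc; simp
  | cons y l ihl =>
    intro acc
    rw [List.foldl_cons, inner, ihl, List.flatMap_cons]
    simp [List.append_assoc]

theorem pvBuild_nodup (P : Nat → Nat → Prop) [inst : ∀ x y, Decidable (P x y)] (w h : Nat) :
    ((List.range h).flatMap (fun y =>
      (List.range w).filterMap (fun x =>
        if P x y then some ((x : Int), (y : Int)) else none))).Nodup := by
  rw [List.nodup_flatMap]
  constructor
  · intro y _
    refine List.Nodup.filterMap ?_ (List.nodup_range)
    intro a a' b hb hb'
    by_cases h1 : P a y
    · by_cases h2 : P a' y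
      · simp only [if_pos h1, Option.mem_def, Option.some_inj] at hb
        simp only [if_pos h2, Option.mem_def, Option.some_inj] at hb'
        rw [← hb'] at hb
        have h4 : ((a : Int)) = ((a' : Int)) := (Prod.ext_iff.1 hb).1
        exact_mod_cast h4
      · simp [if_neg h2] at hb'
    · simp [if_neg h1] at hb
  · refine List.Pairwise.imp ?_ (List.pairwise_lt_range)
    intro y y' hyy' b hb hb'
    obtain ⟨x, _, hx⟩ := List.mem_filterMap.1 hb
    obtain ⟨x', _, hx'⟩ := List.mem_filterMap.1 hb'
    by_cases h1 : P x y
    · by_cases h2 : P x' y'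
      · simp only [if_pos h1, Option.some_inj] at hx
        simp only [if_pos h2, Option.some_inj] at hx'
        have h3 : ((y : Int)) = ((y' : Int)) := by
          rw [← hx] at hx'
          exact ((Prod.ext_iff.1 hx').2).symm
        have h4 : y = y' := by exact_mod_cast h3
        omega
      · simp [if_neg h2] at hx'
    · simp [if_neg h1] at hx

-- ===== VERDICT (by name: the statement is the Claim_ definition above) =====
theorem ok_blanks_spec : Claim_equal_ok_blanks := by
  unfold Claim_equal_ok_blanks
  intro board _ _
  unfold Spec_ok_blanks ok_blanks ok_blanks_alt
  dsimp only
  rw [pvBuild_eq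
    (fun x y => PySem.Str.pyGet? (PySem.List.pyGetD board (y : Int) "") (x : Int) = some '.')
    (fun x y => ((x : Int), (y : Int)))
    (PySem.Str.len (PySem.List.pyGetD board 0 "")).toNat (List.range board.length) []]
  rw [List.nil_append]
  have main : ∀ L : List (Int × Int), L.Nodup →
      pvWhileA L.length L = pvOuterB L (PySem.Set.ofList L) := by
    intro L h
    rw [PySem.Set.ofList_eq_self_of_nodup L h]
    exact pvOuter_equiv L L.length L h (List.Sublist.refl _) h (le_refl _)
  exact main _ (pvBuild_nodup
    (fun x y => PySem.Str.pyGet? (PySem.List.pyGetD board (y : Int) "") (x : Int) = some '.')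
    (PySem.Str.len (PySem.List.pyGetD board 0 "")).toNat board.length)
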